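-- pv_equiv track=rewrite | github.com/InfolabAI/programmers_hee | 프로그래머스/3/92344. 파괴되지 않은 건물/파괴되지 않은 건물.py | solution
-- ===== SOURCE A (Python) =====
-- def solution(board, skill):
--     tmp = [[0 for _ in range(len(board[0])+1)] for _ in range(len(board)+1)]
--
--     for t, r1, c1, r2, c2, d in skill:
--         if t == 1:
--             d = -d
--         tmp[r1][c1] += d
--         tmp[r2+1][c2+1] += d
--         tmp[r1][c2+1] -= d
--         tmp[r2+1][c1] -= d
--
--     for r in range(len(tmp)-1):
--         for c in range(len(tmp[0])):
--             tmp[r+1][c] += tmp[r][c]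
--
--     for r in range(len(tmp)):
--         for c in range(len(tmp[0])-1):
--             tmp[r][c+1] += tmp[r][c]
--
--     for r in range(len(tmp)-1):
--         for c in range(len(tmp[0])-1):
--             board[r][c] += tmp[r][c]
--
--     total = 0
--     for r in range(len(tmp)-1):
--         for c in range(len(tmp[0])-1):
--             if board[r][c] >= 1:
--                 total += 1
--
--     return total
-- ===== SOURCE B (Python) =====
-- def solution(board, skill):
--     def delta(r, c):
--         total = 0
--         for t, r1, c1, r2, c2, d in skill:
--             if r1 <= r <= r2 and c1 <= c <= c2:
--                 total += -d if t == 1 else d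
--         return total
--     m = len(board[0])
--     return sum(1 for r, row in enumerate(board)
--                  for c in range(m)
--                  if row[c] + delta(r, c) >= 1)
-- ===== Notes on version B (the rewrite author's own statement) =====
-- stated objective: simpler
-- what changed: Replaces the 2D difference-array + double prefix-sum machinery with a direct per-cell scan that sums each skill's contribution to a cell and counts cells whose final value is >= 1 (B does not mutate board; equivalence is about the return value).
-- outside the precondition, e.g. on solution([[0], [0], [0]], [[1, 2, 0, 0, 0, 5]]): A returns 1, B returns 0; on solution([[0, 0], [0, 0]], [[1, -1, 0, -1, 1, 5]]): A returns 4, B returns 0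
import Mathlib
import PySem

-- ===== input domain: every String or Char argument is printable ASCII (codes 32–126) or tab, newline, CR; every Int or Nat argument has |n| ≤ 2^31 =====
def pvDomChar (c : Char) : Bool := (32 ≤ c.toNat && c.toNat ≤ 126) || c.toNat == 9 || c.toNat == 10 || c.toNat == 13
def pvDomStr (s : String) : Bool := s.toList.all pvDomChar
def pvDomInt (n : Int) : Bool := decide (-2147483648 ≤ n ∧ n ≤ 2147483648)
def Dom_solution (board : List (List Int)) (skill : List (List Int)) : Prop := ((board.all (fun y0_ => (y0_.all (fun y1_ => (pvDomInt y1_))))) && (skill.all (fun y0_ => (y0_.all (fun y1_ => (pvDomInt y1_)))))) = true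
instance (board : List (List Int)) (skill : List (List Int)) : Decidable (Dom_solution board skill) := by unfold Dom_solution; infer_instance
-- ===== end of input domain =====

-- B drops A's difference-array + prefix-sum passes for a direct per-cell scan over the
-- skills; B does not mutate `board` (A does), so the equivalence is about the return value.

-- grid read: g[r][c] with 0 defaults (all accesses in the ports are in range on Pre_)
def gget (g : List (List Int)) (r c : Nat) : Int := (g.getD r []).getD c 0

-- grid in-place "+= d" at (r, c), Python's tmp[r][c] += d
def gadd (g : List (List Int)) (r c : Nat) (d : Int) : List (List Int) :=
  g.modify r (fun row => row.modify c (fun x => x + d))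

-- ===== PORT A =====
-- body of A's first loop: unpack t,r1,c1,r2,c2,d; flip sign if t == 1; four += on tmp
def Astep (tmp : List (List Int)) (s : List Int) : List (List Int) :=
  let d := if s.getD 0 0 = 1 then -(s.getD 5 0) else s.getD 5 0
  let r1 := (s.getD 1 0).toNat
  let c1 := (s.getD 2 0).toNat
  let r2 := (s.getD 3 0).toNat
  let c2 := (s.getD 4 0).toNat
  gadd (gadd (gadd (gadd tmp r1 c1 d) (r2+1) (c2+1) d) r1 (c2+1) (-d)) (r2+1) c1 (-d)

def solution (board : List (List Int)) (skill : List (List Int)) : Int :=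
  let n := board.length
  let m := (board.headD []).length
  -- tmp = (n+1) × (m+1) zeros; len(tmp)-1 = n, len(tmp[0]) = m+1 below
  let tmp0 : List (List Int) := List.replicate (n+1) (List.replicate (m+1) (0:Int))
  let tmp1 := skill.foldl Astep tmp0
  let tmp2 := (List.range n).foldl
    (fun tmp r => (List.range (m+1)).foldl (fun tmp c => gadd tmp (r+1) c (gget tmp r c)) tmp) tmp1
  let tmp3 := (List.range (n+1)).foldl
    (fun tmp r => (List.range m).foldl (fun tmp c => gadd tmp r (c+1) (gget tmp r c)) tmp) tmp2
  let board1 := (List.range n).foldl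
    (fun b r => (List.range m).foldl (fun b c => gadd b r c (gget tmp3 r c)) b) board
  (List.range n).foldl
    (fun tot r => (List.range m).foldl
      (fun tot c => if gget board1 r c ≥ 1 then tot + 1 else tot) tot) (0:Int)

-- ===== PORT B =====
-- Source B's delta(r, c): total contribution of all skills covering cell (r, c)
def bdelta (skill : List (List Int)) (r c : Int) : Int :=
  skill.foldl (fun total s =>
    if s.getD 1 0 ≤ r ∧ r ≤ s.getD 3 0 ∧ s.getD 2 0 ≤ c ∧ c ≤ s.getD 4 0 then
      total + (if s.getD 0 0 = 1 then -(s.getD 5 0) else s.getD 5 0)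
    else total) 0

def solution_alt (board : List (List Int)) (skill : List (List Int)) : Int :=
  let m := (board.headD []).length
  (PySem.List.enumerate board).foldl (fun tot p =>
    (List.range m).foldl (fun tot (c : Nat) =>
      if p.2.getD c 0 + bdelta skill p.1 (c : Int) ≥ 1 then tot + 1 else tot) tot) 0

-- ===== PRECONDITION & SPEC =====
-- skill row validity: exactly 6 entries, a non-inverted rectangle with indices inside the board
def validS (n m : Nat) (s : List Int) : Prop :=
  s.length = 6 ∧
  0 ≤ s.getD 1 0 ∧ 0 ≤ s.getD 3 0 ∧ s.getD 1 0 ≤ s.getD 3 0 + 1 ∧ s.getD 3 0 < (n : Int) ∧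
  0 ≤ s.getD 2 0 ∧ 0 ≤ s.getD 4 0 ∧ s.getD 2 0 ≤ s.getD 4 0 + 1 ∧ s.getD 4 0 < (m : Int)

-- Pre_ excludes: empty or ragged boards and skill rows that are not 6-long in-range
-- rectangles (r1 ≤ r2+1, c1 ≤ c2+1) — there A raises (IndexError/ValueError), except that on boards
-- with extra trailing cells, on inverted rectangles and on negative (wrap-around) indices
-- A returns a value that is an accident of its difference-array layout and both behaviours
-- are defensible on these out-of-contract inputs.
def Pre_solution (board : List (List Int)) (skill : List (List Int)) : Prop :=
  board ≠ [] ∧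
  (∀ row ∈ board, (board.headD []).length ≤ row.length) ∧
  (∀ s ∈ skill, validS board.length (board.headD []).length s)

instance (board : List (List Int)) (skill : List (List Int)) : Decidable (Pre_solution board skill) := by
  unfold Pre_solution validS; infer_instance

def pvWitness_solution : List (List Int) × List (List Int) :=
  ([[1, 0], [0, 2]], [[1, 0, 0, 1, 1, 1]])

def Spec_solution (board : List (List Int)) (skill : List (List Int)) (out : Int) : Prop := out = solution_alt board skill
instance (board : List (List Int)) (skill : List (List Int)) (out : Int) : Decidable (Spec_solution board skill out) := by unfold Spec_solution; infer_instance

-- ===== CLAIM (what is proved, stated in full; the proofs are below) =====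
def Claim_equal_solution : Prop := ∀ (board : List (List Int)) (skill : List (List Int)), Dom_solution board skill → Pre_solution board skill → Spec_solution board skill (solution board skill)

-- ===== LEMMAS AND PROOFS =====

-- sum of f over 0..k-1
def S (k : Nat) (f : Nat → Int) : Int := ((List.range k).map f).sum

-- rectangular grid shape
def GridP (g : List (List Int)) (R C : Nat) : Prop :=
  g.length = R ∧ ∀ i, i < R → C ≤ (g.getD i []).length


theorem getD_modify {α : Type} (l : List α) (i j : Nat) (f : α → α) (d : α) :
    (l.modify i f).getD j d = if i = j ∧ j < l.length then f (l.getD j d) else l.getD j d := by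
  rw [List.getD_eq_getElem?_getD, List.getD_eq_getElem?_getD, List.getElem?_modify]
  by_cases h : i = j
  · subst h
    by_cases hl : i < l.length
    · simp [hl]
    · rw [List.getElem?_eq_none (by omega)]; simp; omega
  · simp [h]

theorem GridP_gadd {g : List (List Int)} {R C : Nat} (hg : GridP g R C) (r c : Nat) (d : Int) :
    GridP (gadd g r c d) R C := by
  obtain ⟨h1, h2⟩ := hg
  refine ⟨by simpa [gadd] using h1, ?_⟩
  intro i hi
  rw [gadd, getD_modify]
  split_ifs with h
  · rw [List.length_modify]; exact h2 i hi
  · exact h2 i hi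

theorem gget_gadd {g : List (List Int)} {R C : Nat} (hg : GridP g R C)
    {r c : Nat} (hr : r < R) (hc : c < C) (d : Int) (r' c' : Nat) :
    gget (gadd g r c d) r' c' = gget g r' c' + if r' = r ∧ c' = c then d else 0 := by
  obtain ⟨h1, h2⟩ := hg
  rw [gget, gget, gadd, getD_modify]
  by_cases h : r = r' ∧ r' < g.length
  · rw [if_pos h, getD_modify]
    obtain ⟨hr1, hr2⟩ := h
    subst hr1
    by_cases hcc : c' = c
    · subst hcc
      rw [if_pos ⟨rfl, lt_of_lt_of_le hc (h2 r (by omega))⟩, if_pos ⟨rfl, rfl⟩]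
    · rw [if_neg (fun h => hcc h.1.symm), if_neg (fun h => hcc h.2)]
      ring
  · rw [if_neg h]
    have : ¬ (r' = r ∧ c' = c) := by
      rintro ⟨rfl, rfl⟩; exact h ⟨rfl, by omega⟩
    rw [if_neg this]; ring

theorem gget_replicate (R C r c : Nat) :
    gget (List.replicate R (List.replicate C (0:Int))) r c = 0 := by
  rw [gget]
  rcases lt_or_ge r R with h | h
  · rw [List.getD_replicate _ h]
    rcases lt_or_ge c C with h2 | h2
    · rw [List.getD_replicate _ h2]
    · rw [List.getD_eq_default _ _ (by simpa using h2)]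
  · rw [show (List.replicate R (List.replicate C (0:Int))).getD r [] = [] from
        List.getD_eq_default _ _ (by simpa using h)]
    rfl

theorem GridP_replicate (R C : Nat) :
    GridP (List.replicate R (List.replicate C (0:Int))) R C := by
  refine ⟨by simp, ?_⟩
  intro i hi
  rw [List.getD_replicate _ hi, List.length_replicate]


-- signed delta of a skill row
def dval (s : List Int) : Int := if s.getD 0 0 = 1 then -(s.getD 5 0) else s.getD 5 0
def r1n (s : List Int) : Nat := (s.getD 1 0).toNat
def c1n (s : List Int) : Nat := (s.getD 2 0).toNat
def r2n (s : List Int) : Nat := (s.getD 3 0).toNat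
def c2n (s : List Int) : Nat := (s.getD 4 0).toNat

def Ri (s : List Int) (i : Nat) : Int :=
  (if i = r1n s then 1 else 0) - (if i = r2n s + 1 then 1 else 0)
def Cj (s : List Int) (j : Nat) : Int :=
  (if j = c1n s then 1 else 0) - (if j = c2n s + 1 then 1 else 0)

-- value of the difference array built by A's first loop
def diffA (skill : List (List Int)) (i j : Nat) : Int :=
  (skill.map (fun s => dval s * Ri s i * Cj s j)).sum

theorem S_zero (f : Nat → Int) : S 0 f = 0 := rfl

theorem S_succ (k : Nat) (f : Nat → Int) : S (k+1) f = S k f + f k := by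
  simp [S, List.range_succ]

theorem S_add (k : Nat) (f g : Nat → Int) : S k (fun i => f i + g i) = S k f + S k g := by
  induction k with
  | zero => rfl
  | succ k ih => simp [S_succ, ih]; ring

theorem S_mul_right (k : Nat) (f : Nat → Int) (a : Int) :
    S k (fun i => f i * a) = S k f * a := by
  induction k with
  | zero => simp [S_zero]
  | succ k ih => simp [S_succ, ih]; ring





theorem S_congr {k : Nat} {f g : Nat → Int} (h : ∀ x, x < k → f x = g x) : S k f = S k g := by
  induction k with
  | zero => rfl
  | succ k ih => rw [S_succ, S_succ, ih (fun x hx => h x (by omega)), h k (by omega)]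

theorem GridP_foldl {β : Type} {R C : Nat} (step : List (List Int) → β → List (List Int))
    (h : ∀ g b, GridP g R C → GridP (step g b) R C) :
    ∀ (l : List β) (g : List (List Int)), GridP g R C → GridP (l.foldl step g) R C := by
  intro l
  induction l with
  | nil => intro g hg; exact hg
  | cons x xs ih => intro g hg; exact ih _ (h g x hg)




-- ---- phase 1 ----
theorem gget_Astep {n m : Nat} {g : List (List Int)} (hg : GridP g (n+1) (m+1))
    {s : List Int} (hs : validS n m s) {i j : Nat} (hi : i ≤ n) (hj : j ≤ m) :
    gget (Astep g s) i j = gget g i j + dval s * Ri s i * Cj s j := by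
  obtain ⟨hl, h1, h1b, h2, h3, h4, h4b, h5, h6⟩ := hs
  have b1 : r1n s < n + 1 := by unfold r1n; omega
  have b2 : r2n s + 1 < n + 1 := by unfold r2n; omega
  have b3 : c1n s < m + 1 := by unfold c1n; omega
  have b4 : c2n s + 1 < m + 1 := by unfold c2n; omega
  have h13 : r1n s ≤ r2n s + 1 := by unfold r1n r2n; omega
  have h24 : c1n s ≤ c2n s + 1 := by unfold c1n c2n; omega
  have g1 : GridP (gadd g (r1n s) (c1n s) (dval s)) (n+1) (m+1) := GridP_gadd hg _ _ _
  have g2 : GridP (gadd (gadd g (r1n s) (c1n s) (dval s)) (r2n s + 1) (c2n s + 1) (dval s)) (n+1) (m+1) :=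
    GridP_gadd g1 _ _ _
  have g3 : GridP (gadd (gadd (gadd g (r1n s) (c1n s) (dval s)) (r2n s + 1) (c2n s + 1) (dval s))
      (r1n s) (c2n s + 1) (-(dval s))) (n+1) (m+1) := GridP_gadd g2 _ _ _
  show gget (gadd (gadd (gadd (gadd g (r1n s) (c1n s) (dval s)) (r2n s + 1) (c2n s + 1) (dval s))
      (r1n s) (c2n s + 1) (-(dval s))) (r2n s + 1) (c1n s) (-(dval s))) i j = _
  rw [gget_gadd g3 b2 b3, gget_gadd g2 b1 b4, gget_gadd g1 b2 b4, gget_gadd hg b1 b3]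
  unfold Ri Cj
  split_ifs <;> first | (exfalso; omega) | ring

theorem GridP_Astep {g : List (List Int)} {R C : Nat} (hg : GridP g R C) (s : List Int) :
    GridP (Astep g s) R C :=
  GridP_gadd (GridP_gadd (GridP_gadd (GridP_gadd hg _ _ _) _ _ _) _ _ _) _ _ _

theorem phase1 {n m : Nat} :
    ∀ (skill : List (List Int)), (∀ s ∈ skill, validS n m s) →
    ∀ (g : List (List Int)), GridP g (n+1) (m+1) →
    ∀ i j, i ≤ n → j ≤ m →
    gget (skill.foldl Astep g) i j = gget g i j + diffA skill i j := by
  intro skill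
  induction skill with
  | nil => intro _ g hg i j hi hj; simp [diffA]
  | cons s rest ih =>
    intro hv g hg i j hi hj
    have hs := hv s (by simp)
    have hrest : ∀ s' ∈ rest, validS n m s' := fun s' h => hv s' (List.mem_cons_of_mem _ h)
    show gget (rest.foldl Astep (Astep g s)) i j = _
    rw [ih hrest _ (GridP_Astep hg s) i j hi hj, gget_Astep hg hs hi hj]
    simp [diffA]; ring

-- ---- phase 2 (vertical prefix sums) ----
theorem inner2 {n m : Nat} {r : Nat} (hr : r < n) :
    ∀ (k : Nat), k ≤ m + 1 →
    ∀ (g : List (List Int)), GridP g (n+1) (m+1) →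
    ∀ i j, i ≤ n → j ≤ m →
    gget ((List.range k).foldl (fun t c => gadd t (r+1) c (gget t r c)) g) i j
      = gget g i j + if i = r + 1 ∧ j < k then gget g r j else 0 := by
  intro k
  induction k with
  | zero => intro _ g hg i j hi hj; simp
  | succ k ih =>
    intro hk g hg i j hi hj
    rw [List.range_succ, List.foldl_append]
    simp only [List.foldl_cons, List.foldl_nil]
    set t := (List.range k).foldl (fun t c => gadd t (r+1) c (gget t r c)) g with ht
    have hgt : GridP t (n+1) (m+1) :=
      GridP_foldl _ (fun g c hg => GridP_gadd hg _ _ _) _ _ hg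
    rw [gget_gadd hgt (by omega) (by omega) _ i j]
    have hrk := ih (by omega) g hg r k (by omega) (by omega)
    rw [if_neg (by omega), add_zero] at hrk
    rw [hrk, ih (by omega) g hg i j hi hj]
    by_cases hcase : i = r + 1 ∧ j = k
    · obtain ⟨hi', rfl⟩ := hcase
      rw [if_neg (by omega), if_pos ⟨hi', rfl⟩, if_pos (by omega)]
      ring
    · rw [if_neg hcase]
      split_ifs <;> first | (exfalso; omega) | ring

theorem outer2 {n m : Nat} {g : List (List Int)} (hg : GridP g (n+1) (m+1)) :
    ∀ (k : Nat), k ≤ n →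
    ∀ i j, i ≤ n → j ≤ m →
    gget ((List.range k).foldl
      (fun t r => (List.range (m+1)).foldl (fun t c => gadd t (r+1) c (gget t r c)) t) g) i j
      = if i ≤ k then S (i+1) (fun i' => gget g i' j) else gget g i j := by
  intro k
  induction k with
  | zero =>
    intro _ i j hi hj
    simp only [List.range_zero, List.foldl_nil]
    by_cases h0 : i = 0
    · subst h0
      rw [if_pos (le_refl 0), S_succ, S_zero]
      ring
    · rw [if_neg (by omega)]
  | succ k ih =>
    intro hk i j hi hj
    rw [show List.range (k+1) = List.range k ++ [k] from List.range_succ, List.foldl_append]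
    simp only [List.foldl_cons, List.foldl_nil]
    set t := (List.range k).foldl
      (fun t r => (List.range (m+1)).foldl (fun t c => gadd t (r+1) c (gget t r c)) t) g with ht
    have hgt : GridP t (n+1) (m+1) :=
      GridP_foldl _ (fun g r hg =>
        GridP_foldl _ (fun g c hg => GridP_gadd hg _ _ _) _ _ hg) _ _ hg
    rw [inner2 (show k < n by omega) (m+1) le_rfl t hgt i j hi hj]
    rw [ih (by omega) i j hi hj, ih (by omega) k j (by omega) hj]
    by_cases hik : i ≤ k
    · rw [if_pos hik, if_neg (by omega), if_pos (by omega)]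
      ring
    · by_cases hik2 : i = k+1
      · subst hik2
        rw [if_neg (by omega), if_pos ⟨rfl, by omega⟩, if_pos (le_refl k), if_pos (le_refl (k+1)),
          S_succ (k+1) (fun i' => gget g i' j)]
        ring
      · rw [if_neg hik, if_neg (by omega), if_neg (by omega)]
        ring

-- ---- phase 3 (horizontal prefix sums) ----
theorem inner3 {n m : Nat} {r : Nat} (hr : r ≤ n) :
    ∀ (k : Nat), k ≤ m →
    ∀ (g : List (List Int)), GridP g (n+1) (m+1) →
    ∀ i j, i ≤ n → j ≤ m →
    gget ((List.range k).foldl (fun t c => gadd t r (c+1) (gget t r c)) g) i j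
      = if i = r ∧ j ≤ k then S (j+1) (fun j' => gget g r j') else gget g i j := by
  intro k
  induction k with
  | zero =>
    intro _ g hg i j hi hj
    simp only [List.range_zero, List.foldl_nil]
    by_cases h : i = r ∧ j = 0
    · obtain ⟨rfl, rfl⟩ := h
      rw [if_pos ⟨rfl, le_refl 0⟩, S_succ, S_zero]
      ring
    · rw [if_neg (by omega)]
  | succ k ih =>
    intro hk g hg i j hi hj
    rw [show List.range (k+1) = List.range k ++ [k] from List.range_succ, List.foldl_append]
    simp only [List.foldl_cons, List.foldl_nil]
    set t := (List.range k).foldl (fun t c => gadd t r (c+1) (gget t r c)) g with ht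
    have hgt : GridP t (n+1) (m+1) :=
      GridP_foldl _ (fun g c hg => GridP_gadd hg _ _ _) _ _ hg
    rw [gget_gadd hgt (by omega) (by omega) _ i j]
    have hval := ih (by omega) g hg r k hr (by omega)
    rw [if_pos ⟨rfl, le_refl k⟩] at hval
    rw [hval, ih (by omega) g hg i j hi hj]
    by_cases h1 : i = r ∧ j = k+1
    · obtain ⟨hir, rfl⟩ := h1
      rw [if_neg (by omega), if_pos ⟨hir, rfl⟩, if_pos (by omega),
        S_succ (k+1) (fun j' => gget g r j'), hir]
      ring
    · by_cases h2 : i = r ∧ j ≤ k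
      · obtain ⟨rfl, hjk⟩ := h2
        rw [if_pos ⟨rfl, hjk⟩, if_neg h1, if_pos ⟨rfl, by omega⟩]
        ring
      · rw [if_neg h2, if_neg h1, if_neg (by omega)]
        ring

theorem outer3 {n m : Nat} {g : List (List Int)} (hg : GridP g (n+1) (m+1)) :
    ∀ (k : Nat), k ≤ n + 1 →
    ∀ i j, i ≤ n → j ≤ m →
    gget ((List.range k).foldl
      (fun t r => (List.range m).foldl (fun t c => gadd t r (c+1) (gget t r c)) t) g) i j
      = if i < k then S (j+1) (fun j' => gget g i j') else gget g i j := by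
  intro k
  induction k with
  | zero =>
    intro _ i j hi hj
    simp only [List.range_zero, List.foldl_nil]
    rw [if_neg (by omega)]
  | succ k ih =>
    intro hk i j hi hj
    rw [show List.range (k+1) = List.range k ++ [k] from List.range_succ, List.foldl_append]
    simp only [List.foldl_cons, List.foldl_nil]
    set t := (List.range k).foldl
      (fun t r => (List.range m).foldl (fun t c => gadd t r (c+1) (gget t r c)) t) g with ht
    have hgt : GridP t (n+1) (m+1) :=
      GridP_foldl _ (fun g r hg =>
        GridP_foldl _ (fun g c hg => GridP_gadd hg _ _ _) _ _ hg) _ _ hg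
    rw [inner3 (show k ≤ n by omega) m le_rfl t hgt i j hi hj]
    by_cases hik : i = k
    · rw [if_pos ⟨hik, hj⟩, if_pos (by omega)]
      apply S_congr
      intro x hx
      rw [ih (by omega) k x (by omega) (by omega), if_neg (by omega), hik]
    · rw [if_neg (fun h => hik h.1), ih (by omega) i j hi hj]
      by_cases h2 : i < k
      · rw [if_pos h2, if_pos (by omega)]
      · rw [if_neg h2, if_neg (by omega)]

-- ---- phase 4 (add tmp onto board) ----
theorem inner4 {n m : Nat} {r : Nat} (hr : r < n) (v : Nat → Int) :
    ∀ (k : Nat), k ≤ m →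
    ∀ (b : List (List Int)), GridP b n m →
    ∀ i j, i < n → j < m →
    gget ((List.range k).foldl (fun b c => gadd b r c (v c)) b) i j
      = gget b i j + if i = r ∧ j < k then v j else 0 := by
  intro k
  induction k with
  | zero => intro _ b hb i j hi hj; simp
  | succ k ih =>
    intro hk b hb i j hi hj
    rw [show List.range (k+1) = List.range k ++ [k] from List.range_succ, List.foldl_append]
    simp only [List.foldl_cons, List.foldl_nil]
    set t := (List.range k).foldl (fun b c => gadd b r c (v c)) b with ht
    have hbt : GridP t n m :=
      GridP_foldl _ (fun g c hg => GridP_gadd hg _ _ _) _ _ hb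
    rw [gget_gadd hbt hr (by omega) _ i j, ih (by omega) b hb i j hi hj]
    by_cases h1 : i = r ∧ j = k
    · obtain ⟨hir, rfl⟩ := h1
      rw [if_neg (by omega), if_pos ⟨hir, rfl⟩, if_pos (by omega)]
      ring
    · rw [if_neg h1]
      split_ifs <;> first | (exfalso; omega) | ring

theorem outer4 {n m : Nat} (w : Nat → Nat → Int) :
    ∀ (k : Nat), k ≤ n →
    ∀ (b : List (List Int)), GridP b n m →
    ∀ i j, i < n → j < m →
    gget ((List.range k).foldl
      (fun b r => (List.range m).foldl (fun b c => gadd b r c (w r c)) b) b) i j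
      = gget b i j + if i < k then w i j else 0 := by
  intro k
  induction k with
  | zero => intro _ b hb i j hi hj; simp
  | succ k ih =>
    intro hk b hb i j hi hj
    rw [show List.range (k+1) = List.range k ++ [k] from List.range_succ, List.foldl_append]
    simp only [List.foldl_cons, List.foldl_nil]
    set t := (List.range k).foldl
      (fun b r => (List.range m).foldl (fun b c => gadd b r c (w r c)) b) b with ht
    have hbt : GridP t n m :=
      GridP_foldl _ (fun g r hg =>
        GridP_foldl _ (fun g c hg => GridP_gadd hg _ _ _) _ _ hg) _ _ hb
    rw [inner4 (show k < n by omega) (w k) m le_rfl t hbt i j hi hj,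
      ih (by omega) b hb i j hi hj]
    by_cases h1 : i = k
    · rw [h1]
      split_ifs <;> first | (exfalso; omega) | ring
    · split_ifs <;> first | (exfalso; omega) | ring

-- ---- the double prefix sum of the difference array is the rectangle-sum ----
theorem S_Ri {s : List Int} (h : r1n s ≤ r2n s + 1) (r : Nat) :
    S (r+1) (Ri s) = if r1n s ≤ r ∧ r ≤ r2n s then 1 else 0 := by
  induction r with
  | zero => rw [S_succ, S_zero]; unfold Ri; split_ifs <;> first | omega | exact (False.elim (by assumption))
  | succ r ih => rw [S_succ, ih]; unfold Ri; split_ifs <;> omega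

theorem S_Cj {s : List Int} (h : c1n s ≤ c2n s + 1) (c : Nat) :
    S (c+1) (Cj s) = if c1n s ≤ c ∧ c ≤ c2n s then 1 else 0 := by
  induction c with
  | zero => rw [S_succ, S_zero]; unfold Cj; split_ifs <;> first | omega | exact (False.elim (by assumption))
  | succ c ih => rw [S_succ, ih]; unfold Cj; split_ifs <;> omega

theorem doubleS {n m : Nat} :
    ∀ (skill : List (List Int)), (∀ s ∈ skill, validS n m s) →
    ∀ r c : Nat,
    S (c+1) (fun j => S (r+1) (fun i => diffA skill i j))
      = (skill.map (fun s => dval s *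
          (if r1n s ≤ r ∧ r ≤ r2n s then 1 else 0) *
          (if c1n s ≤ c ∧ c ≤ c2n s then 1 else 0))).sum := by
  intro skill
  induction skill with
  | nil => intro _ r c; simp [diffA, S]
  | cons s rest ih =>
    intro hv r c
    obtain ⟨hl, h1, h1b, h2, h3, h4, h4b, h5, h6⟩ := hv s (by simp)
    have h13 : r1n s ≤ r2n s + 1 := by unfold r1n r2n; omega
    have h24 : c1n s ≤ c2n s + 1 := by unfold c1n c2n; omega
    have hrest : ∀ s' ∈ rest, validS n m s' := fun s' h => hv s' (List.mem_cons_of_mem _ h)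
    have inner_eq : ∀ j', S (r+1) (fun i => diffA (s::rest) i j')
        = (if r1n s ≤ r ∧ r ≤ r2n s then 1 else 0) * (dval s * Cj s j')
          + S (r+1) (fun i => diffA rest i j') := by
      intro j'
      have e1 : S (r+1) (fun i => diffA (s::rest) i j')
          = S (r+1) (fun i => Ri s i * (dval s * Cj s j') + diffA rest i j') :=
        S_congr (fun x _ => by simp [diffA]; ring)
      rw [e1, S_add, S_mul_right, S_Ri h13]
    have e2 : S (c+1) (fun j' => S (r+1) (fun i => diffA (s::rest) i j'))
        = S (c+1) (fun j' => Cj s j' * ((if r1n s ≤ r ∧ r ≤ r2n s then 1 else 0) * dval s)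
            + S (r+1) (fun i => diffA rest i j')) :=
      S_congr (fun x _ => by rw [inner_eq x]; ring)
    rw [e2, S_add, S_mul_right, S_Cj h24, ih hrest r c]
    simp only [List.map_cons, List.sum_cons]
    ring

-- ---- B's delta as a map-sum ----
theorem foldl_add_map {α : Type} (t : α → Int) :
    ∀ (l : List α) (a : Int), l.foldl (fun acc x => acc + t x) a = a + (l.map t).sum := by
  intro l
  induction l with
  | nil => intro a; simp
  | cons x xs ih => intro a; simp [ih]; ring

theorem bdelta_eq_sum (skill : List (List Int)) (r c : Int) :
    bdelta skill r c = (skill.map (fun s =>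
      if s.getD 1 0 ≤ r ∧ r ≤ s.getD 3 0 ∧ s.getD 2 0 ≤ c ∧ c ≤ s.getD 4 0
      then dval s else 0)).sum := by
  unfold bdelta
  rw [PySem.List.foldl_congr_mem _ _
    (fun total s => total + (if s.getD 1 0 ≤ r ∧ r ≤ s.getD 3 0 ∧ s.getD 2 0 ≤ c ∧ c ≤ s.getD 4 0
      then dval s else 0)) 0
    (fun acc x _ => by unfold dval; split_ifs <;> simp_all)]
  rw [foldl_add_map, zero_add]

theorem bdelta_eq_rect {n m : Nat} (skill : List (List Int))
    (hsk : ∀ s ∈ skill, validS n m s) (r c : Nat) :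
    bdelta skill (r : Int) (c : Int)
      = (skill.map (fun s => dval s *
          (if r1n s ≤ r ∧ r ≤ r2n s then 1 else 0) *
          (if c1n s ≤ c ∧ c ≤ c2n s then 1 else 0))).sum := by
  rw [bdelta_eq_sum]
  apply congrArg List.sum
  apply List.map_congr_left
  intro s hsm
  obtain ⟨hl, h1, h1b, h2, h3, h4, h4b, h5, h6⟩ := hsk s hsm
  simp only [r1n, r2n, c1n, c2n]
  split_ifs <;> first | (exfalso; omega) | ring

-- ---- B's enumerate folds as range folds ----
theorem enum_foldl {α : Type} [Inhabited α] :
    ∀ (l : List α) (k : Int) (init : Int) (F : Int → Int → α → Int),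
    (PySem.List.enumerate l k).foldl (fun tot q => F tot q.1 q.2) init
      = (List.range l.length).foldl (fun tot (i : Nat) => F tot (k + (i : Int)) (l.getD i default)) init := by
  intro l
  induction l with
  | nil => intro k init F; simp [PySem.List.enumerate_nil]
  | cons x xs ih =>
    intro k init F
    rw [PySem.List.enumerate_cons]
    simp only [List.foldl_cons]
    rw [ih (k+1) (F init k x)]
    rw [show (x :: xs).length = xs.length + 1 from rfl, List.range_succ_eq_map]
    simp only [List.foldl_cons, List.foldl_map, List.getD_cons_zero, List.getD_cons_succ]
    have hfun : (fun (tot : Int) (i : Nat) => F tot (k + 1 + (i : Int)) (xs.getD i default))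
        = (fun (tot : Int) (i : Nat) => F tot (k + ((Nat.succ i : Nat) : Int)) (xs.getD i default)) := by
      funext tot i
      have h : k + 1 + (i : Int) = k + ((Nat.succ i : Nat) : Int) := by push_cast; ring
      rw [h]
    rw [hfun]
    norm_num

-- ===== VERDICT (by name: the statement is the Claim_ definition above) =====
theorem solution_spec : Claim_equal_solution := by
  intro board skill hdom hpre
  obtain ⟨hne, hrows, hsk⟩ := hpre
  show solution board skill = solution_alt board skill
  set n := board.length with hn
  set m := (board.headD []).length with hm
  have hb : GridP board n m := by
    refine ⟨rfl, fun i hi => ?_⟩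
    rw [List.getD_eq_getElem?_getD, List.getElem?_eq_getElem hi]
    exact hrows _ (List.getElem_mem _)
  set tmp0 := List.replicate (n+1) (List.replicate (m+1) (0:Int)) with h0
  set tmp1 := skill.foldl Astep tmp0 with ht1
  set tmp2 := (List.range n).foldl
    (fun tmp r => (List.range (m+1)).foldl (fun tmp c => gadd tmp (r+1) c (gget tmp r c)) tmp)
    tmp1 with ht2
  set tmp3 := (List.range (n+1)).foldl
    (fun tmp r => (List.range m).foldl (fun tmp c => gadd tmp r (c+1) (gget tmp r c)) tmp)
    tmp2 with ht3
  set board1 := (List.range n).foldl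
    (fun b r => (List.range m).foldl (fun b c => gadd b r c (gget tmp3 r c)) b) board with hb1
  have hA : solution board skill = (List.range n).foldl
      (fun tot r => (List.range m).foldl
        (fun tot c => if gget board1 r c ≥ 1 then tot + 1 else tot) tot) (0:Int) := rfl
  have g0 : GridP tmp0 (n+1) (m+1) := GridP_replicate _ _
  have g1 : GridP tmp1 (n+1) (m+1) :=
    GridP_foldl _ (fun g s hg => GridP_Astep hg s) _ _ g0
  have g2 : GridP tmp2 (n+1) (m+1) :=
    GridP_foldl _ (fun g r hg =>
      GridP_foldl _ (fun g c hg => GridP_gadd hg _ _ _) _ _ hg) _ _ g1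
  have e1 : ∀ i j, i ≤ n → j ≤ m → gget tmp1 i j = diffA skill i j := by
    intro i j hi hj
    rw [ht1, phase1 skill hsk tmp0 g0 i j hi hj, h0, gget_replicate, zero_add]
  have e2 : ∀ i j, i ≤ n → j ≤ m →
      gget tmp2 i j = S (i+1) (fun i' => diffA skill i' j) := by
    intro i j hi hj
    rw [ht2, outer2 g1 n le_rfl i j hi hj, if_pos hi]
    exact S_congr (fun x hx => e1 x j (by omega) hj)
  have e3 : ∀ i j, i ≤ n → j ≤ m →
      gget tmp3 i j = S (j+1) (fun j' => S (i+1) (fun i' => diffA skill i' j')) := by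
    intro i j hi hj
    rw [ht3, outer3 g2 (n+1) le_rfl i j hi hj, if_pos (by omega)]
    exact S_congr (fun x hx => e2 i x hi (by omega))
  have e4 : ∀ r c, r < n → c < m →
      gget board1 r c = gget board r c + bdelta skill (r : Int) (c : Int) := by
    intro r c hr hc
    rw [hb1, outer4 (fun r c => gget tmp3 r c) n le_rfl board hb r c hr hc, if_pos hr]
    rw [e3 r c (by omega) (by omega), doubleS skill hsk r c, ← bdelta_eq_rect skill hsk r c]
  rw [hA]
  show _ = (PySem.List.enumerate board).foldl (fun tot p =>
    (List.range m).foldl (fun tot (c : Nat) =>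
      if p.2.getD c 0 + bdelta skill p.1 (c : Int) ≥ 1 then tot + 1 else tot) tot) 0
  rw [enum_foldl board 0 0 (fun tot i row => (List.range m).foldl
    (fun tot (c : Nat) => if row.getD c 0 + bdelta skill i (c : Int) ≥ 1 then tot + 1 else tot) tot)]
  apply PySem.List.foldl_congr_mem
  intro acc r hrmem
  have hr : r < n := List.mem_range.mp hrmem
  apply PySem.List.foldl_congr_mem
  intro acc2 c hcmem
  have hc : c < m := List.mem_range.mp hcmem
  have hcell : gget board1 r c = (board.getD r (default : List Int)).getD c 0
      + bdelta skill (0 + (r:Int)) (c : Int) := by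
    rw [e4 r c hr hc]
    norm_num [gget]
    rfl
  rw [hcell]
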